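-- pv_equiv track=rewrite | github.com/a6enez3r/jval | jval/__init__.py | _contains_invalid
-- ===== SOURCE A (Python) =====
-- from typing import Any, Dict, List, Optional
--
-- def _contains_invalid(jobj: Dict[str, Any], valid: List[str]) -> bool:
--     """
--     Check if all the keys in a JSON object are valid keys.
--
--     Valid keys are comprised of expected + optional.
--
--     Args
--     ----
--         - jobj (Dict[str, Any]): JSON object being validated.
--         - valid (List[str]): Name of allowed parameters.
--
--     Returns
--     -------
--         - bool: List of invalid parameter names found in the JSON object.
--     """
--     # check if any parameter present in JSON object is not in valid / matches
--     # the schema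
--     only_valid = [parameter in valid for parameter in jobj]
--     # if any invalid parameter detected
--     if not all(only_valid):
--         # get names of invalid parameters
--         invalid = [
--             invalid_key
--             for invalid_key, is_valid in zip(list(jobj.keys()), only_valid)
--             if not is_valid
--         ]
--         return invalid
--     return []
-- ===== SOURCE B (Python) =====
-- from typing import Any, Dict, List
--
-- def _contains_invalid(jobj: Dict[str, Any], valid: List[str]) -> bool:
--     """Return keys of jobj not in valid, by successively deleting each valid
--     name from the key list (no per-key membership tests)."""
--     invalid = list(jobj.keys())
--     for name in valid:
--         invalid = [key for key in invalid if key != name]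
--     return invalid
-- ===== Notes on version B (the rewrite author's own statement) =====
-- stated objective: alternative
-- what changed: Inverted the traversal: instead of testing every key for membership in valid (A's boolean list + all() guard + zip pass), B starts from the full key list and, looping over valid, deletes each valid name from it; no membership test ever runs.
import Mathlib
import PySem

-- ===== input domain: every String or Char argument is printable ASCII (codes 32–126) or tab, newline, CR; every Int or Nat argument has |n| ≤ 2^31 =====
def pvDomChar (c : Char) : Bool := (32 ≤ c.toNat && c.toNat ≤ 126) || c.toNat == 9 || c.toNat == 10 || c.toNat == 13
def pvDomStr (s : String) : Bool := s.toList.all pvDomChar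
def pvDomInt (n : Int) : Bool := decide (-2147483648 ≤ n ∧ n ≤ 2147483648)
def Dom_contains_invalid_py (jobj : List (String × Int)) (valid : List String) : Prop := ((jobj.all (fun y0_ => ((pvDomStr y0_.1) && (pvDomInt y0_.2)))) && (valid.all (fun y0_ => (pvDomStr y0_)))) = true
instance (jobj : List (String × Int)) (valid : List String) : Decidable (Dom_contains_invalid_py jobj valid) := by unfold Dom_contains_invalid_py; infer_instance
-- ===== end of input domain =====

-- B inverts the traversal: instead of A's per-key membership tests (boolean list + all() + zip), it loops over `valid` and deletes each valid name from the key list (objective: alternative).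

-- ===== PORT A =====
-- A: only_valid = [k in valid for k in jobj]; if not all(only_valid): return [k for k,v in zip(keys, only_valid) if not v]; return []
def contains_invalid_py (jobj : List (String × Int)) (valid : List String) : List String :=
  let keys := jobj.map Prod.fst
  let only_valid := keys.map (fun parameter => valid.contains parameter)
  if ¬ (only_valid.all id = true) then
    ((keys.zip only_valid).filter (fun kv => !kv.2)).map Prod.fst
  else
    []

-- ===== PORT B =====
-- B: invalid = list(jobj.keys()); for name in valid: invalid = [k for k in invalid if k != name]; return invalid
def contains_invalid_py_alt (jobj : List (String × Int)) (valid : List String) : List String :=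
  valid.foldl (fun invalid name => invalid.filter (fun key => key ≠ name)) (jobj.map Prod.fst)

-- ===== PRECONDITION & SPEC =====
def Spec_contains_invalid_py (jobj : List (String × Int)) (valid : List String) (out : List String) : Prop := out = contains_invalid_py_alt jobj valid
instance (jobj : List (String × Int)) (valid : List String) (out : List String) : Decidable (Spec_contains_invalid_py jobj valid out) := by unfold Spec_contains_invalid_py; infer_instance

-- ===== CLAIM (what is proved, stated in full; the proofs are below) =====
def Claim_equal_contains_invalid_py : Prop := ∀ (jobj : List (String × Int)) (valid : List String), Dom_contains_invalid_py jobj valid → Spec_contains_invalid_py jobj valid (contains_invalid_py jobj valid)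

-- ===== LEMMAS AND PROOFS =====

-- successive deletion of each valid name equals one filter by non-membership
theorem foldl_filter_ne (valid : List String) (ks : List String) :
    valid.foldl (fun invalid name => invalid.filter (fun key => key ≠ name)) ks
      = ks.filter (fun k => !valid.contains k) := by
  induction valid generalizing ks with
  | nil => simp
  | cons v vs ih =>
      simp only [List.foldl_cons, ih, List.filter_filter]
      apply List.filter_congr
      intro k _
      by_cases h : k = v <;> simp [h]

-- zipping keys with their own pointwise image and filtering on the flag is one filter
theorem zip_map_filter_fst (ks : List String) (f : String → Bool) :
    ((ks.zip (ks.map f)).filter (fun kv => !kv.2)).map Prod.fst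
      = ks.filter (fun k => !f k) := by
  induction ks with
  | nil => rfl
  | cons k ks ih =>
      simp only [List.map_cons, List.zip_cons_cons, List.filter_cons]
      by_cases h : f k = true
      · simp [h, ih]
      · simp [Bool.eq_false_iff.mpr h, ih]

theorem filter_eq_nil_of_all (ks : List String) (f : String → Bool)
    (h : (ks.map f).all id = true) : ks.filter (fun k => !f k) = [] := by
  rw [List.filter_eq_nil_iff]
  intro k hk
  have := (List.all_eq_true.mp h) (f k) (List.mem_map_of_mem hk)
  simp at this
  simp [this]

-- ===== VERDICT (by name: the statement is the Claim_ definition above) =====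
theorem contains_invalid_py_spec : Claim_equal_contains_invalid_py := by
  intro jobj valid _
  show contains_invalid_py jobj valid = contains_invalid_py_alt jobj valid
  simp only [contains_invalid_py, contains_invalid_py_alt, foldl_filter_ne]
  by_cases h : ((jobj.map Prod.fst).map (fun parameter => valid.contains parameter)).all id = true
  · rw [if_neg (by exact not_not_intro h)]
    exact (filter_eq_nil_of_all _ _ h).symm
  · rw [if_pos h]
    exact zip_map_filter_fst _ _
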